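-- pv_equiv track=rewrite | github.com/Jpmcrespo/IST-FP | Projeto Credit Cards/Projeto1_Joao Crespo.py | comeca_por
-- ===== SOURCE A (Python) =====
-- def comeca_por(cad1,cad2):
--
--         """verifica se os primeiros elementos da primeira cadeia de caracteres correspondem aos elementos da segunda"""
--
--         num_cad1=int(cad1)
--         num_cad2=int(cad2)
--         while num_cad1>0:
--                 if num_cad1 == num_cad2:
--                         return True
--                 else:
--                         num_cad1=num_cad1//10                        #enquanto a 1a cadeia nao for igual a 2a, ele vai "cortando" os ultimos numeros para chegar aos digitos iniciais
--         return False
-- ===== SOURCE B (Python) =====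
-- def comeca_por(cad1, cad2):
--     """verifica se os primeiros elementos da primeira cadeia de caracteres correspondem aos elementos da segunda"""
--     num_cad1 = int(cad1)
--     num_cad2 = int(cad2)
--     return num_cad1 > 0 and str(num_cad1).startswith(str(num_cad2))
-- ===== Notes on version B (the rewrite author's own statement) =====
-- stated objective: idiomatic
-- what changed: replaces the repeated floor-division-by-10 loop with a single decimal string-prefix test (str(num1).startswith(str(num2))) guarded by num1 > 0
import Mathlib
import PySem

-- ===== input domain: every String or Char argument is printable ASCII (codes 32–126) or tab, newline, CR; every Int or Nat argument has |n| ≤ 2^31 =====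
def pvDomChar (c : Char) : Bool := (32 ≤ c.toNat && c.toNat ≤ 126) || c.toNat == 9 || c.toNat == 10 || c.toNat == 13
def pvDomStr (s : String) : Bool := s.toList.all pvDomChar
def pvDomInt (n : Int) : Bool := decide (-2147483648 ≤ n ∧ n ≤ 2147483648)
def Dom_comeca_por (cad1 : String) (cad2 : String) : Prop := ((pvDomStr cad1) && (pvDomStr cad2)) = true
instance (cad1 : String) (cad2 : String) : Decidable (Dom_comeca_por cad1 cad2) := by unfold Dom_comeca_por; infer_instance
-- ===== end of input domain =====

-- B replaces A's repeated floor-division-by-10 loop with one decimal string-prefix test (idiomatic).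

-- ===== PORT A =====
-- the while-loop of A: while num_cad1 > 0: if num_cad1 == num_cad2: return True; num_cad1 //= 10; return False
def comecaLoop (n1 n2 : Int) : Bool :=
  if _h : 0 < n1 then
    if n1 == n2 then true
    else comecaLoop (PySem.Int.floordiv n1 10) n2
  else false
termination_by n1.toNat
decreasing_by
  rw [PySem.Int.floordiv_eq_ediv_of_pos (by omega : (0:Int) < 10)]
  omega

def comeca_por (cad1 : String) (cad2 : String) : Bool :=
  match PySem.Int.ofStr? cad1, PySem.Int.ofStr? cad2 with
  | some n1, some n2 => comecaLoop n1 n2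
  | _, _ => false   -- int() raises ValueError here; excluded by Pre_

-- ===== PORT B =====
def comeca_por_alt (cad1 : String) (cad2 : String) : Bool :=
  match PySem.Int.ofStr? cad1 with
  | none => false   -- int() raises ValueError here; excluded by Pre_
  | some n1 =>
    match PySem.Int.ofStr? cad2 with
    | none => false   -- int() raises ValueError here; excluded by Pre_
    | some n2 =>
      decide (0 < n1) && PySem.Str.startswith (PySem.Int.toStr n1) (PySem.Int.toStr n2)

-- ===== PRECONDITION & SPEC =====
-- Pre_ excludes exactly the inputs where Python's int() raises ValueError (non-integer strings).
def Pre_comeca_por (cad1 : String) (cad2 : String) : Prop :=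
  (PySem.Int.ofStr? cad1).isSome ∧ (PySem.Int.ofStr? cad2).isSome
instance (cad1 : String) (cad2 : String) : Decidable (Pre_comeca_por cad1 cad2) := by
  unfold Pre_comeca_por; infer_instance

def pvWitness_comeca_por : String × String := ("123", "12")

def Spec_comeca_por (cad1 : String) (cad2 : String) (out : Bool) : Prop := out = comeca_por_alt cad1 cad2
instance (cad1 : String) (cad2 : String) (out : Bool) : Decidable (Spec_comeca_por cad1 cad2 out) := by
  unfold Spec_comeca_por; infer_instance

-- ===== CLAIM (what is proved, stated in full; the proofs are below) =====
def Claim_equal_comeca_por : Prop := ∀ (cad1 : String) (cad2 : String), Dom_comeca_por cad1 cad2 → Pre_comeca_por cad1 cad2 → Spec_comeca_por cad1 cad2 (comeca_por cad1 cad2)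

-- ===== LEMMAS AND PROOFS =====

-- str(n) for a natural number is Nat.toDigits 10 n; pvTD abbreviates it
def pvTD (n : Nat) : List Char := Nat.toDigits 10 n

lemma pvCoreAcc (f n : Nat) (l : List Char) :
    Nat.toDigitsCore 10 f n l = Nat.toDigitsCore 10 f n [] ++ l := by
  induction f generalizing n l with
  | zero => simp [Nat.toDigitsCore]
  | succ f ih =>
    simp only [Nat.toDigitsCore]
    split
    · rfl
    · rw [ih (n / 10) (Nat.digitChar (n % 10) :: l), ih (n / 10) [Nat.digitChar (n % 10)]]
      simp

lemma pvCoreFuel (n : Nat) : ∀ f g, n < f → n < g → ∀ l,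
    Nat.toDigitsCore 10 f n l = Nat.toDigitsCore 10 g n l := by
  induction n using Nat.strong_induction_on with
  | _ n ih =>
    intro f g hf hg l
    match f, g with
    | f + 1, g + 1 =>
      simp only [Nat.toDigitsCore]
      split
      · rfl
      · next h =>
        exact ih (n / 10) (by omega) f g (by omega) (by omega) _

lemma pvTD_small (n : Nat) (h : n < 10) : pvTD n = [Nat.digitChar n] := by
  unfold pvTD Nat.toDigits
  simp [Nat.toDigitsCore, Nat.div_eq_of_lt h, Nat.mod_eq_of_lt h]

lemma pvTD_step (n : Nat) (h : 10 ≤ n) :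
    pvTD n = pvTD (n / 10) ++ [Nat.digitChar (n % 10)] := by
  have h1 : ¬ n / 10 = 0 := by omega
  unfold pvTD Nat.toDigits
  simp only [Nat.toDigitsCore, h1, if_false]
  rw [pvCoreAcc, pvCoreFuel (n / 10) n (n / 10 + 1) (by omega) (by omega)]
  simp only [Nat.toDigitsCore]

lemma pvTD_ne_nil (n : Nat) : pvTD n ≠ [] := by
  rcases lt_or_ge n 10 with h | h
  · simp [pvTD_small n h]
  · simp [pvTD_step n h]

lemma pvTD_len2 (n : Nat) (h : 10 ≤ n) : 2 ≤ (pvTD n).length := by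
  rw [pvTD_step n h]
  have := List.length_pos_iff.mpr (pvTD_ne_nil (n / 10))
  simp
  omega

lemma pvDigitChar_inj : ∀ a < 10, ∀ b < 10, Nat.digitChar a = Nat.digitChar b → a = b := by decide

lemma pvDigitChar_ne_dash : ∀ a < 10, Nat.digitChar a ≠ '-' := by decide

lemma pvTD_no_dash (n : Nat) : '-' ∉ pvTD n := by
  induction n using Nat.strong_induction_on with
  | _ n ih =>
    rcases lt_or_ge n 10 with h | h
    · rw [pvTD_small n h]
      intro hmem; simp at hmem
      exact pvDigitChar_ne_dash n h hmem.symm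
    · rw [pvTD_step n h]
      intro hmem
      rcases List.mem_append.mp hmem with hm | hm
      · exact ih (n / 10) (by omega) hm
      · simp at hm
        exact pvDigitChar_ne_dash (n % 10) (by omega) hm.symm

lemma pvTD_inj (m : Nat) : ∀ k, pvTD m = pvTD k → m = k := by
  induction m using Nat.strong_induction_on with
  | _ m ih =>
    intro k h
    rcases lt_or_ge m 10 with hm | hm <;> rcases lt_or_ge k 10 with hk | hk
    · rw [pvTD_small m hm, pvTD_small k hk] at h
      simp at h
      exact pvDigitChar_inj m hm k hk h
    · have h2 := pvTD_len2 k hk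
      rw [← h, pvTD_small m hm] at h2
      simp at h2
    · have h2 := pvTD_len2 m hm
      rw [h, pvTD_small k hk] at h2
      simp at h2
    · rw [pvTD_step m hm, pvTD_step k hk] at h
      obtain ⟨hA, hB⟩ := List.append_inj' h rfl
      simp at hB
      have e1 : m / 10 = k / 10 := ih (m / 10) (by omega) _ hA
      have e2 : m % 10 = k % 10 := pvDigitChar_inj _ (by omega) _ (by omega) hB
      omega

-- peeling the last digit off m mirrors one iteration of A's loop on the prefix test
lemma pvPrefix_step (m k : Nat) (hne : m ≠ k) :
    (pvTD k <+: pvTD m) ↔ (0 < m / 10 ∧ pvTD k <+: pvTD (m / 10)) := by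
  rcases lt_or_ge m 10 with h | h
  · have hdiv : m / 10 = 0 := by omega
    simp only [hdiv, lt_irrefl, false_and, iff_false]
    intro hp
    have hlen1 : (pvTD k).length ≤ 1 := by
      have h1 := hp.length_le
      rwa [pvTD_small m h, List.length_singleton] at h1
    have heq : pvTD k = pvTD m :=
      hp.eq_of_length (by
        have h2 := List.length_pos_iff.mpr (pvTD_ne_nil k)
        rw [pvTD_small m h, List.length_singleton]; omega)
    exact hne (pvTD_inj k m heq).symm
  · have hdiv : 0 < m / 10 := by omega
    simp only [hdiv, true_and]
    rw [pvTD_step m h, List.prefix_concat_iff]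
    constructor
    · rintro (heq | hp)
      · rw [← pvTD_step m h] at heq
        exact absurd (pvTD_inj k m heq) (fun e => hne e.symm)
      · exact hp
    · exact Or.inr

lemma pvToChars_nonneg (n : Nat) : PySem.Int.toChars (n : Int) = pvTD n := by
  simp [PySem.Int.toChars, pvTD]

lemma pvToChars_neg (n : Int) (h : n < 0) : PySem.Int.toChars n = '-' :: Nat.toDigits 10 n.natAbs := by
  simp [PySem.Int.toChars, h]

lemma pvNoDashPrefix (m : Nat) (rest : List Char) :
    PySem.Chars.startswith (pvTD m) ('-' :: rest) = false := by
  cases hsw : PySem.Chars.startswith (pvTD m) ('-' :: rest) with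
  | false => rfl
  | true =>
    exfalso
    obtain ⟨t, ht⟩ := (PySem.Chars.startswith_iff _ _).mp hsw
    have : '-' ∈ pvTD m := by rw [← ht]; simp
    exact pvTD_no_dash m this

lemma pvLoop_eq (n1 n2 : Int) :
    comecaLoop n1 n2 =
      (decide (0 < n1) && PySem.Chars.startswith (PySem.Int.toChars n1) (PySem.Int.toChars n2)) := by
  induction n1 using comecaLoop.induct (n2 := n2) with
  | case1 x h heq =>
    have hx2 : x = n2 := beq_iff_eq.mp heq
    subst hx2
    rw [comecaLoop, dif_pos h, if_pos heq, decide_eq_true h, Bool.true_and]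
    exact ((PySem.Chars.startswith_iff _ _).mpr (List.prefix_refl _)).symm
  | case2 x h heq ih =>
    rw [comecaLoop]
    simp only [dif_pos h, if_neg heq]
    rw [ih]
    have hne : x ≠ n2 := fun e => heq (by simp [e])
    obtain ⟨m, hm⟩ : ∃ m : Nat, x = (m : Int) := ⟨x.toNat, by omega⟩
    subst hm
    have hfd : PySem.Int.floordiv (m : Int) 10 = ((m / 10 : Nat) : Int) := by
      rw [PySem.Int.floordiv_eq_ediv_of_pos (by omega : (0:Int) < 10)]
      omega
    have hm0 : 0 < m := by omega
    rw [hfd]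
    have hd1 : decide (0 < (m : Int)) = true := by simp; omega
    rcases lt_or_ge n2 0 with hn2 | hn2
    · rw [pvToChars_neg n2 hn2, pvToChars_nonneg, pvToChars_nonneg]
      rw [pvNoDashPrefix, pvNoDashPrefix]
      simp
    · obtain ⟨k, hk⟩ : ∃ k : Nat, n2 = (k : Int) := ⟨n2.toNat, by omega⟩
      subst hk
      rw [pvToChars_nonneg, pvToChars_nonneg, pvToChars_nonneg]
      have hmk : m ≠ k := by omega
      have hstep := pvPrefix_step m k hmk
      by_cases hdiv : 0 < m / 10
      · have hd2 : decide (0 < ((m / 10 : Nat) : Int)) = true := by simp; omega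
        rw [hd1, hd2, Bool.true_and, Bool.true_and]
        cases hsw : PySem.Chars.startswith (pvTD (m / 10)) (pvTD k) with
        | false =>
          cases hsw2 : PySem.Chars.startswith (pvTD m) (pvTD k) with
          | false => rfl
          | true =>
            exfalso
            have hp := (hstep.mp ((PySem.Chars.startswith_iff _ _).mp hsw2)).2
            rw [(PySem.Chars.startswith_iff _ _).mpr hp] at hsw
            exact Bool.noConfusion hsw
        | true =>
          exact ((PySem.Chars.startswith_iff _ _).mpr
            (hstep.mpr ⟨hdiv, (PySem.Chars.startswith_iff _ _).mp hsw⟩)).symm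
      · have hd2 : decide (0 < ((m / 10 : Nat) : Int)) = false := by simp; omega
        rw [hd1, hd2, Bool.true_and, Bool.false_and]
        cases hsw : PySem.Chars.startswith (pvTD m) (pvTD k) with
        | false => rfl
        | true =>
          exfalso
          exact hdiv (hstep.mp ((PySem.Chars.startswith_iff _ _).mp hsw)).1
  | case3 x h =>
    rw [comecaLoop]
    simp [h]

-- ===== VERDICT (by name: the statement is the Claim_ definition above) =====
theorem comeca_por_spec : Claim_equal_comeca_por := by
  unfold Claim_equal_comeca_por Spec_comeca_por Pre_comeca_por
  intro cad1 cad2 _ hpre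
  obtain ⟨h1, h2⟩ := hpre
  rcases ho1 : PySem.Int.ofStr? cad1 with _ | n1
  · rw [ho1] at h1; simp at h1
  rcases ho2 : PySem.Int.ofStr? cad2 with _ | n2
  · rw [ho2] at h2; simp at h2
  simp only [comeca_por, comeca_por_alt, ho1, ho2]
  rw [pvLoop_eq]
  simp [PySem.Int.toList_toStr]
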